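-- pv_equiv track=rewrite | github.com/bssrdf/pyleet | AndroidUnlockPatterns.py | numPatterns
-- ===== SOURCE A (Python) =====
-- def numPatterns(m, n):
--     """
--     :type m: int
--     :type n: int
--     :rtype: int
--
--     """
--     visited = [False] * 10
--     paths = {(1,3):2, (3,1):2, (1,7):4, (7,1):4,
--              (7,9):8, (9,7):8, (3,9):6, (9,3):6,
--              (1,9):5, (9,1):5, (3,7):5, (7,3):5}
--     def dfs(visited, pre, remain):
--         if remain < 0: return 0
--         if remain == 0: return 1
--         visited[pre] = True
--         cnt = 0
--         for k in range(1,10):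
--             if visited[k]: continue
--             if (pre, k) in paths and not visited[paths[(pre, k)]]:
--                 continue
--             cnt += dfs(visited, k, remain-1)
--         visited[pre] = False
--         return cnt
--     res = 0
--     for i in range(m, n+1):
--         res += dfs(visited, 1, i-1) * 4 # 1,3,7,9 are symmetric
--         res += dfs(visited, 2, i-1) * 4 # 2,4,6,8 are symmetric
--         res += dfs(visited, 5, i-1)
--     return res
-- ===== SOURCE B (Python) =====
-- def numPatterns(m, n):
--     # Bitmask dynamic programming with memoization: each state (visited-mask, last key,
--     # remaining steps) is solved once, and the length range is clamped to [max(m,1), min(n,9)]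
--     # since a pattern visits at most 9 distinct keys (lengths outside contribute nothing).
--     skip = {(1, 3): 2, (3, 1): 2, (1, 7): 4, (7, 1): 4,
--             (7, 9): 8, (9, 7): 8, (3, 9): 6, (9, 3): 6,
--             (1, 9): 5, (9, 1): 5, (3, 7): 5, (7, 3): 5}
--     memo = {}
--
--     def count(mask, last, remain):
--         if remain == 0:
--             return 1
--         key = (mask, last, remain)
--         if key in memo:
--             return memo[key]
--         total = 0
--         for k in range(1, 10):
--             if mask >> k & 1:
--                 continue
--             mid = skip.get((last, k))
--             if mid is not None and not (mask >> mid & 1):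
--                 continue
--             total += count(mask | 1 << k, k, remain - 1)
--         memo[key] = total
--         return total
--
--     res = 0
--     for i in range(max(m, 1), min(n, 9) + 1):
--         res += count(1 << 1, 1, i - 1) * 4   # 1,3,7,9 are symmetric corners
--         res += count(1 << 2, 2, i - 1) * 4   # 2,4,6,8 are symmetric edges
--         res += count(1 << 5, 5, i - 1)
--     return res
-- ===== Notes on version B (the rewrite author's own statement) =====
-- stated objective: alternative
-- what changed: A re-enumerates every unlock path with an exhaustive DFS separately for each length in range(m, n+1); B solves each (visited-mask, last-key, remaining) state once via a memoized bitmask DP and sums only the clamped length range [max(m,1), min(n,9)], since a pattern visits at most 9 distinct keys (so B returns quickly on wide [m,n] ranges where A iterates over every length; on small ranges the cost is similar).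
import Mathlib
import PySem

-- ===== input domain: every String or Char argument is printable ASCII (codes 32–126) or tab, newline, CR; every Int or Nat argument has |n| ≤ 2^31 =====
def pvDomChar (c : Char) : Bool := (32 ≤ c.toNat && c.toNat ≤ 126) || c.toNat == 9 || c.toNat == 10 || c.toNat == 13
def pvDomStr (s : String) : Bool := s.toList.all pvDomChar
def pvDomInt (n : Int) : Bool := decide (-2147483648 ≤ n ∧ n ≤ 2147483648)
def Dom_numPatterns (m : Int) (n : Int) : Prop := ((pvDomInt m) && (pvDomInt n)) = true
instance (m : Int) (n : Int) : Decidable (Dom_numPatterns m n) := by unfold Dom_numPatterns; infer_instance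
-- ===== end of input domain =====

-- B replaces A's repeated exhaustive DFS path enumeration by a memoized bitmask DP
-- (each (mask,last,remain) state solved once) over the length range clamped to [max(m,1), min(n,9)].

-- ===== PORT A =====

-- the `paths` dict of A (key (pre,k) ↦ key that must already be visited to jump over)
def pathsA : PySem.Dict (Int × Int) Int := PySem.Dict.mk
  [((1,3),2), ((3,1),2), ((1,7),4), ((7,1),4), ((7,9),8), ((9,7),8),
   ((3,9),6), ((9,3),6), ((1,9),5), ((9,1),5), ((3,7),5), ((7,3),5)]

-- dfs's recursion decreases `remain` by 1 until the `remain < 0` / `remain == 0` guards fire;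
-- after the `remain < 0` guard (in dfsA) it is realised structurally on remain.toNat.
-- Indices into `visited` (pre, k, paths values) are always in 1..9, so `.set`/`.getD` are the
-- exact in-range Python list assignment/subscript; dfs restores visited[pre] before returning,
-- so the functional port passes the updated list only downward.
def dfsGo (visited : List Bool) (pre : Int) : Nat → Int
  | 0 => 1                                           -- if remain == 0: return 1
  | r+1 =>
    let v := visited.set pre.toNat true              -- visited[pre] = True
    (PySem.List.pyRange 1 10 1).foldl (fun cnt k =>
      if v.getD k.toNat false then cnt               -- if visited[k]: continue
      else match PySem.Dict.get? pathsA (pre, k) with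
        | some mid => if !(v.getD mid.toNat false) then cnt   -- (pre,k) in paths and not visited[paths[(pre,k)]]
                      else cnt + dfsGo v k r
        | none => cnt + dfsGo v k r) 0

def dfsA (visited : List Bool) (pre : Int) (remain : Int) : Int :=
  if remain < 0 then 0 else dfsGo visited pre remain.toNat

def numPatterns (m : Int) (n : Int) : Int :=
  let visited := List.replicate 10 false
  (PySem.List.pyRange m (n+1) 1).foldl
    (fun res i => res + dfsA visited 1 (i-1) * 4 + dfsA visited 2 (i-1) * 4 + dfsA visited 5 (i-1)) 0

-- ===== PORT B =====

-- the `skip` dict of Source B (same 12 pairs)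
def skipB : PySem.Dict (Int × Int) Int := PySem.Dict.mk
  [((1,3),2), ((3,1),2), ((1,7),4), ((7,1),4), ((7,9),8), ((9,7),8),
   ((3,9),6), ((9,3),6), ((1,9),5), ((9,1),5), ((3,7),5), ((7,3),5)]

-- Source B's `count(mask, last, remain)` with the memo dict threaded explicitly.
-- `mask` is a nonnegative Python int used only through `>>`, `&`, `|`, `<<`: ported as Nat
-- (exact for nonnegative ints); `remain` is ≥ 0 at every call, realised structurally on the Nat
-- and stored in the memo key as the Int it is in Python.
def countB (memo : PySem.Dict (Nat × Int × Int) Int) (mask : Nat) (last : Int) :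
    Nat → PySem.Dict (Nat × Int × Int) Int × Int
  | 0 => (memo, 1)                                   -- if remain == 0: return 1
  | r+1 =>
    match PySem.Dict.get? memo (mask, last, (r : Int) + 1) with   -- if key in memo: return memo[key]
    | some v => (memo, v)
    | none =>
      let st := (PySem.List.pyRange 1 10 1).foldl
        (fun (st : PySem.Dict (Nat × Int × Int) Int × Int) k =>
          if (mask >>> k.toNat) &&& 1 == 1 then st             -- if mask >> k & 1: continue
          else match PySem.Dict.get? skipB (last, k) with      -- mid = skip.get((last, k))
            | some mid => if !((mask >>> mid.toNat) &&& 1 == 1) then st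
                          else
                            let r' := countB st.1 (mask ||| 1 <<< k.toNat) k r
                            (r'.1, st.2 + r'.2)
            | none =>
                let r' := countB st.1 (mask ||| 1 <<< k.toNat) k r
                (r'.1, st.2 + r'.2)) (memo, 0)
      (st.1.insert (mask, last, (r : Int) + 1) st.2, st.2)     -- memo[key] = total; return total

def numPatterns_alt (m : Int) (n : Int) : Int :=
  ((PySem.List.pyRange (max m 1) ((min n 9) + 1) 1).foldl
    (fun (st : PySem.Dict (Nat × Int × Int) Int × Int) i =>
      let p1 := countB st.1 (1 <<< 1) 1 (i-1).toNat   -- count(1 << 1, 1, i-1): i ≥ max(m,1) ≥ 1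
      let p2 := countB p1.1 (1 <<< 2) 2 (i-1).toNat
      let p5 := countB p2.1 (1 <<< 5) 5 (i-1).toNat
      (p5.1, st.2 + p1.2 * 4 + p2.2 * 4 + p5.2)) (PySem.Dict.empty, 0)).2

-- ===== PRECONDITION & SPEC =====
def Spec_numPatterns (m : Int) (n : Int) (out : Int) : Prop := out = numPatterns_alt m n
instance (m : Int) (n : Int) (out : Int) : Decidable (Spec_numPatterns m n out) := by unfold Spec_numPatterns; infer_instance

-- ===== CLAIM (what is proved, stated in full; the proofs are below) =====
def Claim_equal_numPatterns : Prop := ∀ (m : Int) (n : Int), Dom_numPatterns m n → Spec_numPatterns m n (numPatterns m n)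



-- ===== LEMMAS AND PROOFS =====

-- memo-free version of Source B's count: the mathematical value of a state
def pureC (mask : Nat) (last : Int) : Nat → Int
  | 0 => 1
  | r+1 =>
    (PySem.List.pyRange 1 10 1).foldl
      (fun tot k =>
        if (mask >>> k.toNat) &&& 1 == 1 then tot
        else match PySem.Dict.get? skipB (last, k) with
          | some mid => if !((mask >>> mid.toNat) &&& 1 == 1) then tot
                        else tot + pureC (mask ||| 1 <<< k.toNat) k r
          | none => tot + pureC (mask ||| 1 <<< k.toNat) k r) 0

-- the memo invariant: every stored entry is the pure value of its state
def InvM (memo : PySem.Dict (Nat × Int × Int) Int) : Prop :=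
  ∀ mask last rem v, PySem.Dict.get? memo (mask, last, rem) = some v →
    v = pureC mask last rem.toNat ∧ 1 ≤ rem

-- mask bit j ↔ list entry j (only positions 0..9 are ever consulted)
def BitRel (mask : Nat) (v : List Bool) : Prop :=
  ∀ j : Nat, j < 10 → (((mask >>> j) &&& 1 == 1) = v.getD j false)

-- the per-k contribution of one iteration of A's inner loop
def addA (v : List Bool) (pre : Int) (r : Nat) (k : Int) : Int :=
  if v.getD k.toNat false then 0
  else match PySem.Dict.get? pathsA (pre, k) with
    | some mid => if !(v.getD mid.toNat false) then 0 else dfsGo v k r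
    | none => dfsGo v k r

-- the per-k contribution of one iteration of pureC's loop
def addP (mask : Nat) (last : Int) (r : Nat) (k : Int) : Int :=
  if (mask >>> k.toNat) &&& 1 == 1 then 0
  else match PySem.Dict.get? skipB (last, k) with
    | some mid => if !((mask >>> mid.toNat) &&& 1 == 1) then 0
                  else pureC (mask ||| 1 <<< k.toNat) k r
    | none => pureC (mask ||| 1 <<< k.toNat) k r

-- countB's inner loop body, named (definitionally equal to the lambda in countB)
def stepB (mask : Nat) (last : Int) (r : Nat)
    (st : PySem.Dict (Nat × Int × Int) Int × Int) (k : Int) :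
    PySem.Dict (Nat × Int × Int) Int × Int :=
  if (mask >>> k.toNat) &&& 1 == 1 then st
  else match PySem.Dict.get? skipB (last, k) with
    | some mid => if !((mask >>> mid.toNat) &&& 1 == 1) then st
                  else ((countB st.1 (mask ||| 1 <<< k.toNat) k r).1,
                        st.2 + (countB st.1 (mask ||| 1 <<< k.toNat) k r).2)
    | none => ((countB st.1 (mask ||| 1 <<< k.toNat) k r).1,
               st.2 + (countB st.1 (mask ||| 1 <<< k.toNat) k r).2)

theorem countB_succ (memo : PySem.Dict (Nat × Int × Int) Int) (mask : Nat)
    (last : Int) (r : Nat) :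
    countB memo mask last (r+1)
      = match PySem.Dict.get? memo (mask, last, (r : Int) + 1) with
        | some v => (memo, v)
        | none =>
          (((PySem.List.pyRange 1 10 1).foldl (stepB mask last r) (memo, 0)).1.insert
              (mask, last, (r : Int) + 1)
              ((PySem.List.pyRange 1 10 1).foldl (stepB mask last r) (memo, 0)).2,
           ((PySem.List.pyRange 1 10 1).foldl (stepB mask last r) (memo, 0)).2) := rfl

theorem bitEq (x j : Nat) : ((x >>> j) &&& 1 == 1) = x.testBit j := by
  simp [Nat.testBit, Nat.and_comm]

theorem gset_ne (v : List Bool) {i j : Nat} (h : i ≠ j) (x d : Bool) :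
    (v.set i x).getD j d = v.getD j d := by
  simp [List.getD_eq_getElem?_getD, List.getElem?_set_ne h]

theorem gset_self (v : List Bool) {i : Nat} (h : i < v.length) (x d : Bool) :
    (v.set i x).getD i d = x := by
  simp [List.getD_eq_getElem?_getD, h]

theorem count_set_true (v : List Bool) (i : Nat) (hi : i < v.length)
    (hv : v.getD i false = false) : (v.set i true).count true = v.count true + 1 := by
  induction v generalizing i with
  | nil => simp at hi
  | cons a t ih =>
    cases i with
    | zero =>
      simp only [List.getD_cons_zero] at hv
      subst hv
      simp [List.count_cons]
    | succ j =>
      simp only [List.getD_cons_succ] at hv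
      simp only [List.length_cons, Nat.add_lt_add_iff_right] at hi
      simp [List.set, List.count_cons, ih j hi hv]
      omega

theorem count_le9 (v : List Bool) (hlen : v.length = 10)
    (h0 : v.getD 0 false = false) : v.count true ≤ 9 := by
  cases v with
  | nil => simp at hlen
  | cons a t =>
    simp only [List.getD_cons_zero] at h0
    subst h0
    simp only [List.length_cons] at hlen
    have := List.count_le_length (l := t) (a := true)
    simp [List.count_cons]
    omega

theorem dfsGo_succ (v : List Bool) (pre : Int) (r : Nat) :
    dfsGo v pre (r+1)
      = ((PySem.List.pyRange 1 10 1).map (addA (v.set pre.toNat true) pre r)).sum := by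
  have h0 : dfsGo v pre (r+1) = (PySem.List.pyRange 1 10 1).foldl
      (fun cnt k =>
        if (v.set pre.toNat true).getD k.toNat false then cnt
        else match PySem.Dict.get? pathsA (pre, k) with
          | some mid => if !((v.set pre.toNat true).getD mid.toNat false) then cnt
                        else cnt + dfsGo (v.set pre.toNat true) k r
          | none => cnt + dfsGo (v.set pre.toNat true) k r) 0 := rfl
  have h1 : (PySem.List.pyRange 1 10 1).foldl
      (fun cnt k =>
        if (v.set pre.toNat true).getD k.toNat false then cnt
        else match PySem.Dict.get? pathsA (pre, k) with
          | some mid => if !((v.set pre.toNat true).getD mid.toNat false) then cnt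
                        else cnt + dfsGo (v.set pre.toNat true) k r
          | none => cnt + dfsGo (v.set pre.toNat true) k r) 0
      = (PySem.List.pyRange 1 10 1).foldl
        (fun cnt k => cnt + addA (v.set pre.toNat true) pre r k) 0 := by
    apply PySem.List.foldl_congr_mem
    intro cnt k _
    simp only [addA]
    by_cases hc : (v.set pre.toNat true).getD k.toNat false = true
    · rw [if_pos hc, if_pos hc, add_zero]
    · rw [if_neg hc, if_neg hc]
      split
      · next mid heq =>
          by_cases h2 : (!((v.set pre.toNat true).getD mid.toNat false)) = true
          · rw [if_pos h2, if_pos h2, add_zero]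
          · rw [if_neg h2, if_neg h2]
      · rfl
  rw [h0, h1, PySem.List.foldl_add]
  simp

theorem pureC_succ (mask : Nat) (last : Int) (r : Nat) :
    pureC mask last (r+1)
      = ((PySem.List.pyRange 1 10 1).map (addP mask last r)).sum := by
  have h0 : pureC mask last (r+1) = (PySem.List.pyRange 1 10 1).foldl
      (fun tot k =>
        if (mask >>> k.toNat) &&& 1 == 1 then tot
        else match PySem.Dict.get? skipB (last, k) with
          | some mid => if !((mask >>> mid.toNat) &&& 1 == 1) then tot
                        else tot + pureC (mask ||| 1 <<< k.toNat) k r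
          | none => tot + pureC (mask ||| 1 <<< k.toNat) k r) 0 := rfl
  have h1 : (PySem.List.pyRange 1 10 1).foldl
      (fun tot k =>
        if (mask >>> k.toNat) &&& 1 == 1 then tot
        else match PySem.Dict.get? skipB (last, k) with
          | some mid => if !((mask >>> mid.toNat) &&& 1 == 1) then tot
                        else tot + pureC (mask ||| 1 <<< k.toNat) k r
          | none => tot + pureC (mask ||| 1 <<< k.toNat) k r) 0
      = (PySem.List.pyRange 1 10 1).foldl
        (fun tot k => tot + addP mask last r k) 0 := by
    apply PySem.List.foldl_congr_mem
    intro tot k _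
    simp only [addP]
    by_cases hc : ((mask >>> k.toNat) &&& 1 == 1) = true
    · rw [if_pos hc, if_pos hc, add_zero]
    · rw [if_neg hc, if_neg hc]
      split
      · next mid heq =>
          by_cases h2 : (!((mask >>> mid.toNat) &&& 1 == 1)) = true
          · rw [if_pos h2, if_pos h2, add_zero]
          · rw [if_neg h2, if_neg h2]
      · rfl
  rw [h0, h1, PySem.List.foldl_add]
  simp

theorem mid_range {last k mid : Int} (h : PySem.Dict.get? skipB (last, k) = some mid) :
    1 ≤ mid ∧ mid ≤ 9 := by
  have hm := PySem.Dict.mem_items_of_get?_eq_some _ h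
  simp [skipB, Prod.ext_iff] at hm
  omega

theorem bridge (r : Nat) : ∀ (v : List Bool) (pre : Int) (mask : Nat),
    v.length = 10 → BitRel mask (v.set pre.toNat true) →
    dfsGo v pre r = pureC mask pre r := by
  induction r with
  | zero => intro v pre mask _ _; rfl
  | succ r ih =>
    intro v pre mask hlen hrel
    rw [dfsGo_succ, pureC_succ]
    congr 1
    apply List.map_congr_left
    intro k hk
    obtain ⟨hk1, hk9⟩ := (PySem.List.mem_pyRange_one).1 hk
    have hk10 : k.toNat < 10 := by omega
    have h1 := hrel k.toNat hk10
    have hd : PySem.Dict.get? pathsA (pre, k) = PySem.Dict.get? skipB (pre, k) := rfl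
    have hrec : dfsGo (v.set pre.toNat true) k r
        = pureC (mask ||| 1 <<< k.toNat) k r := by
      apply ih
      · simp [hlen]
      · intro j hj
        by_cases hjk : j = k.toNat
        · subst hjk
          rw [gset_self _ (by simp [hlen]; omega)]
          rw [bitEq]
          simp [Nat.testBit_or, Nat.one_shiftLeft, Nat.testBit_two_pow_self]
        · rw [gset_ne _ (fun hc => hjk hc.symm)]
          rw [← hrel j hj]
          rw [bitEq, bitEq]
          simp [Nat.testBit_or, Nat.one_shiftLeft,
            Nat.testBit_two_pow_of_ne (show k.toNat ≠ j from fun hc => hjk hc.symm)]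
    simp only [addA, addP]
    rw [hd, h1]
    by_cases hvk : (v.set pre.toNat true).getD k.toNat false = true
    · rw [if_pos hvk, if_pos hvk]
    · rw [if_neg hvk, if_neg hvk]
      split
      · next mid heq =>
          obtain ⟨hm1, hm9⟩ := mid_range heq
          have h2 := hrel mid.toNat (by omega)
          rw [h2]
          by_cases hvm : (!((v.set pre.toNat true).getD mid.toNat false)) = true
          · rw [if_pos hvm, if_pos hvm]
          · rw [if_neg hvm, if_neg hvm]; exact hrec
      · exact hrec

theorem dfsGo_big_zero (r : Nat) : ∀ (v : List Bool) (pre : Int),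
    v.length = 10 → v.getD 0 false = false → 1 ≤ pre → pre ≤ 9 →
    9 < r + (v.set pre.toNat true).count true →
    dfsGo v pre r = 0 := by
  induction r with
  | zero =>
    intro v pre hlen h0 hp1 hp9 hbig
    exfalso
    have hne : pre.toNat ≠ 0 := by omega
    have hcle : (v.set pre.toNat true).count true ≤ 9 := by
      apply count_le9
      · simp [hlen]
      · rw [gset_ne _ hne]; exact h0
    omega
  | succ r ih =>
    intro v pre hlen h0 hp1 hp9 hbig
    rw [dfsGo_succ]
    apply List.sum_eq_zero
    intro x hx
    rw [List.mem_map] at hx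
    obtain ⟨k, hk, rfl⟩ := hx
    obtain ⟨hk1, hk10⟩ := (PySem.List.mem_pyRange_one).1 hk
    simp only [addA]
    by_cases h1 : (v.set pre.toNat true).getD k.toNat false = true
    · rw [if_pos h1]
    · rw [if_neg h1]
      have h1' : (v.set pre.toNat true).getD k.toNat false = false := by
        simpa using h1
      have hrec : dfsGo (v.set pre.toNat true) k r = 0 := by
        apply ih
        · simp [hlen]
        · rw [gset_ne _ (show pre.toNat ≠ 0 by omega)]; exact h0
        · exact hk1
        · omega
        · have hct := count_set_true (v.set pre.toNat true) k.toNat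
            (by simp [hlen]; omega) h1'
          omega
      split
      · next mid heq =>
          by_cases h2 : (!((v.set pre.toNat true).getD mid.toNat false)) = true
          · rw [if_pos h2]
          · rw [if_neg h2]; exact hrec
      · exact hrec

theorem stepB_spec (r : Nat)
    (ihr : ∀ (memo : PySem.Dict (Nat × Int × Int) Int) (mask' : Nat) (last' : Int),
      InvM memo → (countB memo mask' last' r).2 = pureC mask' last' r ∧
        InvM (countB memo mask' last' r).1)
    (mask : Nat) (last : Int) (st : PySem.Dict (Nat × Int × Int) Int × Int)
    (k : Int) (hst : InvM st.1) :
    InvM (stepB mask last r st k).1 ∧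
      (stepB mask last r st k).2 = st.2 + addP mask last r k := by
  simp only [stepB, addP]
  by_cases h1 : ((mask >>> k.toNat) &&& 1 == 1) = true
  · rw [if_pos h1, if_pos h1]
    exact ⟨hst, (add_zero _).symm⟩
  · rw [if_neg h1, if_neg h1]
    split
    · next mid heq =>
        by_cases h2 : (!((mask >>> mid.toNat) &&& 1 == 1)) = true
        · rw [if_pos h2, if_pos h2]
          exact ⟨hst, (add_zero _).symm⟩
        · rw [if_neg h2, if_neg h2]
          obtain ⟨hv, hi⟩ := ihr st.1 (mask ||| 1 <<< k.toNat) k hst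
          exact ⟨hi, by rw [hv]⟩
    · obtain ⟨hv, hi⟩ := ihr st.1 (mask ||| 1 <<< k.toNat) k hst
      exact ⟨hi, by rw [hv]⟩

theorem stepB_fold (r : Nat)
    (ihr : ∀ (memo : PySem.Dict (Nat × Int × Int) Int) (mask' : Nat) (last' : Int),
      InvM memo → (countB memo mask' last' r).2 = pureC mask' last' r ∧
        InvM (countB memo mask' last' r).1)
    (mask : Nat) (last : Int) :
    ∀ (ks : List Int) (st : PySem.Dict (Nat × Int × Int) Int × Int), InvM st.1 →
      InvM ((ks.foldl (stepB mask last r) st).1) ∧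
        (ks.foldl (stepB mask last r) st).2
          = st.2 + (ks.map (addP mask last r)).sum := by
  intro ks
  induction ks with
  | nil => intro st h; exact ⟨h, by simp⟩
  | cons k t iht =>
    intro st hst
    obtain ⟨hi, hv⟩ := stepB_spec r ihr mask last st k hst
    rw [List.foldl_cons]
    obtain ⟨hti, htv⟩ := iht (stepB mask last r st k) hi
    refine ⟨hti, ?_⟩
    rw [htv, hv, List.map_cons, List.sum_cons]
    ring

theorem countB_correct (r : Nat) :
    ∀ (memo : PySem.Dict (Nat × Int × Int) Int) (mask : Nat) (last : Int),
    InvM memo → (countB memo mask last r).2 = pureC mask last r ∧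
      InvM (countB memo mask last r).1 := by
  induction r with
  | zero => intro memo mask last h; exact ⟨rfl, h⟩
  | succ r ih =>
    intro memo mask last hInv
    rw [countB_succ]
    cases hG : PySem.Dict.get? memo (mask, last, (r : Int) + 1) with
    | some v =>
      obtain ⟨hval, _⟩ := hInv mask last ((r : Int) + 1) v hG
      have ht : ((r : Int) + 1).toNat = r + 1 := by omega
      rw [ht] at hval
      exact ⟨hval, hInv⟩
    | none =>
      obtain ⟨hfi, hfv⟩ := stepB_fold r ih mask last
        (PySem.List.pyRange 1 10 1) (memo, 0) hInv
      constructor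
      · show ((PySem.List.pyRange 1 10 1).foldl (stepB mask last r) (memo, 0)).2
          = pureC mask last (r+1)
        rw [hfv, pureC_succ]
        simp
      · intro mask' last' rem' v' hget
        rw [PySem.Dict.get?_insert] at hget
        by_cases hkey : ((mask', last', rem') : Nat × Int × Int)
            = (mask, last, (r : Int) + 1)
        · rw [if_pos hkey] at hget
          obtain ⟨e1, e2, e3⟩ : mask' = mask ∧ last' = last ∧ rem' = (r : Int) + 1 := by
            simpa [Prod.ext_iff] using hkey
          subst e1; subst e2; subst e3
          injection hget with hv'
          constructor
          · rw [← hv', hfv]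
            have ht : ((r : Int) + 1).toNat = r + 1 := by omega
            rw [ht, pureC_succ]
            simp
          · omega
        · rw [if_neg hkey] at hget
          exact hfi mask' last' rem' v' hget

theorem InvM_empty : InvM PySem.Dict.empty := by
  intro mask last rem v h
  rw [PySem.Dict.get?_empty] at h
  exact absurd h (by simp)

def v0L : List Bool := List.replicate 10 false

def FA (i : Int) : Int :=
  dfsA v0L 1 (i-1) * 4 + dfsA v0L 2 (i-1) * 4 + dfsA v0L 5 (i-1)

def GB (i : Int) : Int :=
  pureC (1 <<< 1) 1 (i-1).toNat * 4 + pureC (1 <<< 2) 2 (i-1).toNat * 4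
    + pureC (1 <<< 5) 5 (i-1).toNat

-- the body of numPatterns_alt's outer loop, named (definitionally equal to its lambda)
def stepT (st : PySem.Dict (Nat × Int × Int) Int × Int) (i : Int) :
    PySem.Dict (Nat × Int × Int) Int × Int :=
  ((countB (countB (countB st.1 (1 <<< 1) 1 (i-1).toNat).1 (1 <<< 2) 2
      (i-1).toNat).1 (1 <<< 5) 5 (i-1).toNat).1,
   st.2 + (countB st.1 (1 <<< 1) 1 (i-1).toNat).2 * 4
     + (countB (countB st.1 (1 <<< 1) 1 (i-1).toNat).1 (1 <<< 2) 2 (i-1).toNat).2 * 4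
     + (countB (countB (countB st.1 (1 <<< 1) 1 (i-1).toNat).1 (1 <<< 2) 2
         (i-1).toNat).1 (1 <<< 5) 5 (i-1).toNat).2)

theorem stepT_loop : ∀ (l : List Int) (st : PySem.Dict (Nat × Int × Int) Int × Int),
    InvM st.1 → (l.foldl stepT st).2 = st.2 + (l.map GB).sum := by
  intro l
  induction l with
  | nil => intro st _; simp
  | cons i t iht =>
    intro st hst
    obtain ⟨h1v, h1i⟩ := countB_correct (i-1).toNat st.1 (1 <<< 1) 1 hst
    obtain ⟨h2v, h2i⟩ := countB_correct (i-1).toNat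
      (countB st.1 (1 <<< 1) 1 (i-1).toNat).1 (1 <<< 2) 2 h1i
    obtain ⟨h3v, h3i⟩ := countB_correct (i-1).toNat
      (countB (countB st.1 (1 <<< 1) 1 (i-1).toNat).1 (1 <<< 2) 2 (i-1).toNat).1
      (1 <<< 5) 5 h2i
    rw [List.foldl_cons]
    rw [iht (stepT st i) h3i]
    have hstep2 : (stepT st i).2 = st.2 + GB i := by
      simp only [stepT, GB]
      rw [h1v, h2v, h3v]
      ring
    rw [hstep2, List.map_cons, List.sum_cons]
    ring

theorem A_eq_sum (m n : Int) :
    numPatterns m n = ((PySem.List.pyRange m (n+1) 1).map FA).sum := by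
  have h0 : numPatterns m n = (PySem.List.pyRange m (n+1) 1).foldl
      (fun res i => res + FA i) 0 := by
    show (PySem.List.pyRange m (n+1) 1).foldl _ 0 = _
    apply PySem.List.foldl_congr_mem
    intro acc i _
    simp only [FA, v0L]
    ring
  rw [h0, PySem.List.foldl_add]
  simp

theorem B_eq_sum (m n : Int) :
    numPatterns_alt m n
      = ((PySem.List.pyRange (max m 1) ((min n 9) + 1) 1).map GB).sum := by
  have h0 : numPatterns_alt m n
      = ((PySem.List.pyRange (max m 1) ((min n 9) + 1) 1).foldl stepT
          (PySem.Dict.empty, 0)).2 := rfl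
  rw [h0, stepT_loop _ _ InvM_empty]
  simp

theorem FA_nonpos {i : Int} (h : i ≤ 0) : FA i = 0 := by
  simp [FA, dfsA, show i - 1 < 0 by omega]

theorem brel1 : BitRel (1 <<< 1) (v0L.set (1 : Int).toNat true) := by
  unfold BitRel v0L; decide

theorem brel2 : BitRel (1 <<< 2) (v0L.set (2 : Int).toNat true) := by
  unfold BitRel v0L; decide

theorem brel5 : BitRel (1 <<< 5) (v0L.set (5 : Int).toNat true) := by
  unfold BitRel v0L; decide

theorem FA_eq_GB {i : Int} (h : 1 ≤ i) : FA i = GB i := by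
  have h0 : ¬(i - 1 < 0) := by omega
  simp only [FA, GB, dfsA, if_neg h0]
  rw [bridge (i-1).toNat v0L 1 (1 <<< 1) (by simp [v0L]) brel1,
    bridge (i-1).toNat v0L 2 (1 <<< 2) (by simp [v0L]) brel2,
    bridge (i-1).toNat v0L 5 (1 <<< 5) (by simp [v0L]) brel5]
  norm_num

theorem FA_big {i : Int} (h : 10 ≤ i) : FA i = 0 := by
  have h0 : ¬(i - 1 < 0) := by omega
  simp only [FA, dfsA, if_neg h0]
  have hz : ∀ p : Int, 1 ≤ p → p ≤ 9 →
      (v0L.set p.toNat true).count true = 1 →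
      dfsGo v0L p (i-1).toNat = 0 := by
    intro p hp1 hp9 hc
    apply dfsGo_big_zero
    · simp [v0L]
    · simp [v0L]
    · exact hp1
    · exact hp9
    · rw [hc]; omega
  rw [hz 1 (by omega) (by omega) (by decide),
    hz 2 (by omega) (by omega) (by decide),
    hz 5 (by omega) (by omega) (by decide)]
  ring

-- ===== VERDICT (by name: the statement is the Claim_ definition above) =====
theorem numPatterns_spec : Claim_equal_numPatterns := by
  intro m n _dom
  show numPatterns m n = numPatterns_alt m n
  rw [A_eq_sum, B_eq_sum]
  by_cases hmn : n < m
  · rw [PySem.List.pyRange_one_eq_nil (by omega),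
      PySem.List.pyRange_one_eq_nil (by omega)]
    simp
  · by_cases hn1 : n < 1
    · rw [PySem.List.pyRange_one_eq_nil (show (min n 9) + 1 ≤ max m 1 by omega)]
      simp only [List.map_nil, List.sum_nil]
      apply List.sum_eq_zero
      intro x hx
      rw [List.mem_map] at hx
      obtain ⟨i, hi, rfl⟩ := hx
      obtain ⟨him, hin⟩ := (PySem.List.mem_pyRange_one).1 hi
      exact FA_nonpos (by omega)
    · by_cases hm9 : 9 < m
      · rw [PySem.List.pyRange_one_eq_nil (show (min n 9) + 1 ≤ max m 1 by omega)]
        simp only [List.map_nil, List.sum_nil]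
        apply List.sum_eq_zero
        intro x hx
        rw [List.mem_map] at hx
        obtain ⟨i, hi, rfl⟩ := hx
        obtain ⟨him, hin⟩ := (PySem.List.mem_pyRange_one).1 hi
        exact FA_big (by omega)
      · have h1 : m ≤ max m 1 := by omega
        have h2 : max m 1 ≤ (min n 9) + 1 := by omega
        have h3 : (min n 9) + 1 ≤ n + 1 := by omega
        rw [PySem.List.pyRange_one_append m (max m 1) (n+1) h1 (by omega),
          PySem.List.pyRange_one_append (max m 1) ((min n 9) + 1) (n+1) h2 h3]
        rw [List.map_append, List.map_append, List.sum_append, List.sum_append]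
        have hfront : ((PySem.List.pyRange m (max m 1) 1).map FA).sum = 0 := by
          apply List.sum_eq_zero
          intro x hx
          rw [List.mem_map] at hx
          obtain ⟨i, hi, rfl⟩ := hx
          obtain ⟨him, hin⟩ := (PySem.List.mem_pyRange_one).1 hi
          exact FA_nonpos (by omega)
        have htail : ((PySem.List.pyRange ((min n 9) + 1) (n+1) 1).map FA).sum = 0 := by
          apply List.sum_eq_zero
          intro x hx
          rw [List.mem_map] at hx
          obtain ⟨i, hi, rfl⟩ := hx
          obtain ⟨him, hin⟩ := (PySem.List.mem_pyRange_one).1 hi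
          exact FA_big (by omega)
        have hmid : ((PySem.List.pyRange (max m 1) ((min n 9) + 1) 1).map FA)
            = ((PySem.List.pyRange (max m 1) ((min n 9) + 1) 1).map GB) := by
          apply List.map_congr_left
          intro i hi
          obtain ⟨him, hin⟩ := (PySem.List.mem_pyRange_one).1 hi
          exact FA_eq_GB (by omega)
        rw [hfront, htail, hmid]
        ring
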